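-- pv_equiv track=rewrite | github.com/mvsuriel/hw2 | hw2_third_questions.py | country_with_most_cases
-- ===== SOURCE A (Python) =====
-- def total_registered_cases_per_country(data):
--     totals = {}
--     for country, cases in data.items():
--         totals[country] = sum(cases)
--     return totals
--
-- def country_with_most_cases(data):
--     totals = total_registered_cases_per_country(data)
--     most_cases_country = None
--     highest_cases = 0
--     for country, cases in totals.items():
--         if cases > highest_cases:
--             most_cases_country = country
--             highest_cases = cases
--     return most_cases_country
-- ===== SOURCE B (Python) =====
-- def country_with_most_cases(data):
--     ranked = sorted(data.items(), key=lambda kv: -sum(kv[1]))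
--     if not ranked:
--         return None
--     country, cases = ranked[0]
--     return country if sum(cases) > 0 else None
-- ===== Notes on version B (the rewrite author's own statement) =====
-- stated objective: alternative
-- what changed: Replaces A's totals dict built by a helper plus a hand-written running-max scan with a stable sort of the items by descending total, taking the head and checking its total is positive; the dict and the max-tracking loop disappear (stability preserves A's first-of-the-maxima tie-break, strict >0 preserves the None-on-nonpositive behaviour).
import Mathlib
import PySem

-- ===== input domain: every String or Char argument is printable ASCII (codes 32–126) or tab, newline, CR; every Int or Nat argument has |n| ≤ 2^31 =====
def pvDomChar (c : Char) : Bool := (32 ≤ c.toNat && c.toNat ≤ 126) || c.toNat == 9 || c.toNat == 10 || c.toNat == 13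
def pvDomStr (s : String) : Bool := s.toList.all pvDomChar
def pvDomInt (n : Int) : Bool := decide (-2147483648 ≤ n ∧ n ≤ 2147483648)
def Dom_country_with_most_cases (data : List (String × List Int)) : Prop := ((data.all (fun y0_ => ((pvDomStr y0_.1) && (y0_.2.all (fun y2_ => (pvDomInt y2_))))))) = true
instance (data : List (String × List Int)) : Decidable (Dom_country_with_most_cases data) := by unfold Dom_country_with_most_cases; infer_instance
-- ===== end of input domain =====

-- B replaces A's totals dict + second running-max scan with a stable sort of the items by
-- descending total and a look at the head (alternative algorithm, not faster).


-- ===== PORT A =====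
def total_registered_cases_per_country (data : List (String × List Int)) : PySem.Dict String Int :=
  data.foldl (fun totals cv => totals.insert cv.1 cv.2.sum) PySem.Dict.empty

def country_with_most_cases (data : List (String × List Int)) : Option String :=
  let totals := total_registered_cases_per_country data
  let st := totals.items.foldl
    (fun (acc : Option String × Int) cc => if cc.2 > acc.2 then (some cc.1, cc.2) else acc)
    (none, 0)
  st.1

-- ===== PORT B =====
def country_with_most_cases_alt (data : List (String × List Int)) : Option String :=
  let ranked := PySem.List.sorted data (fun kv => -(kv.2.sum))
  match ranked with
  | [] => none
  | (country, cases) :: _ => if cases.sum > 0 then some country else none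

-- ===== PRECONDITION & SPEC =====
-- Pre_ excludes association lists with duplicate country keys, which cannot arise from a
-- Python dict argument; on them A's dict overwrite-in-place order is a representation artifact.
def Pre_country_with_most_cases (data : List (String × List Int)) : Prop :=
  (data.map Prod.fst).Nodup
instance (data : List (String × List Int)) : Decidable (Pre_country_with_most_cases data) := by
  unfold Pre_country_with_most_cases; infer_instance

def pvWitness_country_with_most_cases : (List (String × List Int)) :=
  [("us", [3, 4]), ("nl", [7]), ("pe", [])]

def Spec_country_with_most_cases (data : List (String × List Int)) (out : Option String) : Prop := out = country_with_most_cases_alt data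
instance (data : List (String × List Int)) (out : Option String) : Decidable (Spec_country_with_most_cases data out) := by unfold Spec_country_with_most_cases; infer_instance

-- ===== CLAIM (what is proved, stated in full; the proofs are below) =====
def Claim_equal_country_with_most_cases : Prop := ∀ (data : List (String × List Int)), Dom_country_with_most_cases data → Pre_country_with_most_cases data → Spec_country_with_most_cases data (country_with_most_cases data)

-- ===== LEMMAS AND PROOFS =====

-- the first-max fold: on (country, total) pairs (A's loop), and raw items (B's sort head)
def pvG (a y : String × Int) : String × Int := if a.2 < y.2 then y else a
def pvGraw (a y : String × List Int) : String × List Int := if a.2.sum < y.2.sum then y else a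
def pvF (kv : String × List Int) : String × Int := (kv.1, kv.2.sum)
def pvBef (a b : String × List Int) : Bool := decide ((-(a.2.sum) : Int) < -(b.2.sum))

lemma pvG_snd_le (ts : List (String × Int)) (a : String × Int) :
    a.2 ≤ (ts.foldl pvG a).2 := by
  induction ts generalizing a with
  | nil => simp
  | cons y rest ih =>
    simp only [List.foldl_cons]
    refine le_trans ?_ (ih (pvG a y))
    unfold pvG; split <;> omega

-- lockstep phase of A's loop: once the state mirrors the running max, it stays in lockstep
lemma pvLock (ts : List (String × Int)) (a : String × Int) :
    ts.foldl (fun (acc : Option String × Int) cc => if cc.2 > acc.2 then (some cc.1, cc.2) else acc)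
      (some a.1, a.2)
      = (some (ts.foldl pvG a).1, (ts.foldl pvG a).2) := by
  induction ts generalizing a with
  | nil => rfl
  | cons y rest ih =>
    simp only [List.foldl_cons]
    by_cases h : a.2 < y.2
    · rw [if_pos h, show pvG a y = y by unfold pvG; rw [if_pos h]]
      exact ih y
    · rw [if_neg h, show pvG a y = a by unfold pvG; rw [if_neg h]]
      exact ih a

-- pre-threshold phase of A's loop: while the running max stays ≤ h, the state is frozen
lemma pvPhase (ts : List (String × Int)) (b : Option String) (h : Int) (a : String × Int)
    (ha : a.2 ≤ h) :
    ts.foldl (fun (acc : Option String × Int) cc => if cc.2 > acc.2 then (some cc.1, cc.2) else acc)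
      (b, h)
      = (let r := ts.foldl pvG a; if h < r.2 then (some r.1, r.2) else (b, h)) := by
  induction ts generalizing a b h with
  | nil => simp only [List.foldl_nil]; rw [if_neg (by omega)]
  | cons y rest ih =>
    simp only [List.foldl_cons]
    by_cases hy : h < y.2
    · rw [if_pos hy, show pvG a y = y from by unfold pvG; rw [if_pos (by omega)]]
      rw [pvLock rest y]
      have := pvG_snd_le rest y
      rw [show (let r := rest.foldl pvG y;
            if h < r.2 then (some r.1, r.2) else (b, h))
          = (some (rest.foldl pvG y).1, (rest.foldl pvG y).2) from by
        dsimp only; rw [if_pos (by omega)]]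
    · rw [if_neg hy]
      have ha' : (pvG a y).2 ≤ h := by unfold pvG; split <;> omega
      exact ih b h (pvG a y) ha'

lemma pvItems (data : List (String × List Int)) (hnd : (data.map Prod.fst).Nodup) :
    (total_registered_cases_per_country data).items = data.map pvF := by
  unfold total_registered_cases_per_country
  rw [PySem.Dict.items_foldl_insert_fresh data (fun cv => cv.1) (fun cv => cv.2.sum)
        PySem.Dict.empty (fun a _ => PySem.Dict.contains_empty _) hnd]
  rfl

lemma pvInsertBy_cons {α : Type} (bef : α → α → Bool) (x h : α) (t : List α) :
    PySem.List.insertBy bef x (h :: t)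
      = if bef x h then x :: h :: t else h :: PySem.List.insertBy bef x t := by
  conv_lhs => unfold PySem.List.insertBy

-- head of B's insertion sort = the first-max fold over the raw items
lemma pvHead (xs : List (String × List Int)) (h : String × List Int) (t : List (String × List Int)) :
    ∃ t', xs.foldl (fun acc x => PySem.List.insertBy pvBef x acc) (h :: t)
            = xs.foldl pvGraw h :: t' := by
  induction xs generalizing h t with
  | nil => exact ⟨t, rfl⟩
  | cons y rest ih =>
    simp only [List.foldl_cons]
    by_cases hy : h.2.sum < y.2.sum
    · rw [pvInsertBy_cons, if_pos (by simp [pvBef]; omega)]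
      rw [show pvGraw h y = y from by unfold pvGraw; rw [if_pos hy]]
      exact ih y (h :: t)
    · rw [pvInsertBy_cons, if_neg (by simp [pvBef]; omega)]
      rw [show pvGraw h y = h from by unfold pvGraw; rw [if_neg hy]]
      exact ih h _

-- the first-max fold commutes with summing each country's cases
lemma pvFoldMap (xs : List (String × List Int)) (a : String × List Int) :
    (xs.map pvF).foldl pvG (pvF a) = pvF (xs.foldl pvGraw a) := by
  induction xs generalizing a with
  | nil => rfl
  | cons y rest ih =>
    simp only [List.map_cons, List.foldl_cons]
    rw [show pvG (pvF a) (pvF y) = pvF (pvGraw a y) from by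
      unfold pvG pvGraw pvF; dsimp only; split <;> simp_all]
    exact ih (pvGraw a y)

-- ===== VERDICT (by name: the statement is the Claim_ definition above) =====
theorem country_with_most_cases_spec : Claim_equal_country_with_most_cases := by
  intro data _ hpre
  unfold Spec_country_with_most_cases country_with_most_cases country_with_most_cases_alt
  dsimp only
  rw [pvItems data hpre]
  rw [PySem.List.sorted_eq_foldl_insertBy data (fun kv => -(kv.2.sum))]
  cases data with
  | nil => simp
  | cons d0 ds =>
    simp only [List.map_cons, List.foldl_cons]
    rw [show PySem.List.insertBy (fun a b => decide ((fun kv : String × List Int => -(kv.2.sum)) a < (fun kv : String × List Int => -(kv.2.sum)) b)) d0 []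
          = PySem.List.insertBy pvBef d0 [] from rfl]
    obtain ⟨t', ht'⟩ := pvHead ds d0 []
    have hmap := pvFoldMap ds d0
    rcases hre : ds.foldl pvGraw d0 with ⟨w, ws⟩
    rw [hre] at ht' hmap
    rw [show (List.foldl (fun acc x => PySem.List.insertBy (fun a b => decide ((fun kv : String × List Int => -(kv.2.sum)) a < (fun kv : String × List Int => -(kv.2.sum)) b)) x acc) (PySem.List.insertBy pvBef d0 []) ds)
          = (w, ws) :: t' from ht']
    have h1 : (ds.map pvF).foldl pvG (pvF d0) = (w, ws.sum) := by rw [hmap]; rfl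
    by_cases h0 : (0 : Int) < (pvF d0).2
    · rw [if_pos (by simpa [pvF] using h0), pvLock (ds.map pvF) (pvF d0), h1]
      have hle := pvG_snd_le (ds.map pvF) (pvF d0)
      rw [h1] at hle
      simp only [pvF] at hle h0 ⊢
      rw [if_pos (by omega)]
    · rw [if_neg (by simpa [pvF] using h0), pvPhase (ds.map pvF) none 0 (pvF d0) (by simpa [pvF] using h0), h1]
      dsimp only
      by_cases hr : (0 : Int) < ws.sum
      · rw [if_pos hr, if_pos hr]
      · rw [if_neg hr, if_neg hr]
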